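-- pv_equiv track=rewrite | github.com/RIXIAO-ZHANG/cs61A | practice_code/sabacc_winner.py | sabacc_winner
-- ===== SOURCE A (Python) =====
-- def sabacc_winner(cards,player0,player1):
--     if cards == 0:
--         return player0
--     if cards == 1:
--         return player1
--
--     take_one = sabacc_winner(cards-1,player1,player0)
--     take_two = sabacc_winner(cards-2,player1,player0)
--
--     if take_one == player0 or take_two == player0:
--         return player0
--     return player1
-- ===== SOURCE B (Python) =====
-- def sabacc_winner(cards, player0, player1):
--     # Closed form: the recursion has period 3; player1 wins exactly when cards % 3 == 1.
--     return player1 if cards % 3 == 1 else player0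
-- ===== Notes on version B (the rewrite author's own statement) =====
-- stated objective: faster
-- what changed: Replaced the exponential two-branch recursion by the O(1) period-3 closed form (player1 wins iff cards % 3 == 1); intended as faster: measured 15x at n=256, A times out at larger sizes so the largest-size ratio could not be confirmed.
import Mathlib
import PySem

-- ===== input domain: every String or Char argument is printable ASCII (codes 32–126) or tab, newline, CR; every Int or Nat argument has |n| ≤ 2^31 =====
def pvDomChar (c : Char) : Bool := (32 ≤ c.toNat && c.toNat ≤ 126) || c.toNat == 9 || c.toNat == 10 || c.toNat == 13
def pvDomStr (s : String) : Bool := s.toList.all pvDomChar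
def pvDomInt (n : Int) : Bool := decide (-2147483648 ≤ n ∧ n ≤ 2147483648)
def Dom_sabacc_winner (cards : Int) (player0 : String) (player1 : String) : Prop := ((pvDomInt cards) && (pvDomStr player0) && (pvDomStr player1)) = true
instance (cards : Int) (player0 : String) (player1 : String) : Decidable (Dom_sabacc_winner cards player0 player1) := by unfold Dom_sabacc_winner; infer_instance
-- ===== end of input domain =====

-- B replaces A's exponential recursion by the period-3 closed form (intended as faster; measured 15x at n=256, A times out beyond).

-- ===== PORT A =====
-- A's recursion, on the Nat measure of cards (Pre_ restricts to cards ≥ 0, where this is exact).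
def sabaccRecA : Nat → String → String → String
  | 0, p0, _ => p0
  | 1, _, p1 => p1
  | (n+2), p0, p1 =>
      let take_one := sabaccRecA (n+1) p1 p0
      let take_two := sabaccRecA n p1 p0
      if take_one == p0 || take_two == p0 then p0 else p1

def sabacc_winner (cards : Int) (player0 : String) (player1 : String) : String :=
  sabaccRecA cards.toNat player0 player1

-- ===== PORT B =====
def sabacc_winner_alt (cards : Int) (player0 : String) (player1 : String) : String :=
  if PySem.Int.mod cards 3 == 1 then player1 else player0

-- ===== PRECONDITION & SPEC =====
-- Pre_: cards ≥ 0; on negative cards the Python A recurses without a base case (RecursionError).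
def Pre_sabacc_winner (cards : Int) (player0 : String) (player1 : String) : Prop := 0 ≤ cards
instance (cards : Int) (player0 : String) (player1 : String) : Decidable (Pre_sabacc_winner cards player0 player1) := by unfold Pre_sabacc_winner; infer_instance
def pvWitness_sabacc_winner : Int × String × String := (5, "alice", "bob")

def Spec_sabacc_winner (cards : Int) (player0 : String) (player1 : String) (out : String) : Prop := out = sabacc_winner_alt cards player0 player1
instance (cards : Int) (player0 : String) (player1 : String) (out : String) : Decidable (Spec_sabacc_winner cards player0 player1 out) := by unfold Spec_sabacc_winner; infer_instance

-- ===== CLAIM =====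
def Claim_equal_sabacc_winner : Prop := ∀ (cards : Int) (player0 : String) (player1 : String), Dom_sabacc_winner cards player0 player1 → Pre_sabacc_winner cards player0 player1 → Spec_sabacc_winner cards player0 player1 (sabacc_winner cards player0 player1)

-- ===== LEMMAS AND PROOFS =====
-- Closed form of A's recursion: the current player0 wins unless n % 3 = 1.
theorem sabaccRecA_closed : ∀ (n : Nat) (p0 p1 : String), sabaccRecA n p0 p1 = if n % 3 = 1 then p1 else p0 := by
  intro n
  induction n using Nat.strong_induction_on with
  | _ n ih =>
    match n with
    | 0 => intro p0 p1; simp [sabaccRecA]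
    | 1 => intro p0 p1; simp [sabaccRecA]
    | (m+2) =>
      intro p0 p1
      have h1 := ih (m+1) (by omega) p1 p0
      have h2 := ih m (by omega) p1 p0
      simp only [sabaccRecA, h1, h2]
      rcases (show m % 3 = 0 ∨ m % 3 = 1 ∨ m % 3 = 2 by omega) with h | h | h <;>
        · have e1 : (m+1) % 3 = (m % 3 + 1) % 3 := by omega
          have e2 : (m+2) % 3 = (m % 3 + 2) % 3 := by omega
          rw [h] at e1 e2 ⊢
          simp only [e1, e2]
          by_cases hp : p1 = p0 <;> simp [hp, beq_iff_eq]
-- ===== VERDICT =====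
theorem sabacc_winner_spec : Claim_equal_sabacc_winner := by
  intro cards p0 p1 _ hpre
  unfold Spec_sabacc_winner sabacc_winner sabacc_winner_alt
  have hc : 0 ≤ cards := hpre
  rw [sabaccRecA_closed]
  have h3 : PySem.Int.mod cards 3 = ((cards.toNat % 3 : Nat) : Int) := by
    rw [PySem.Int.mod_eq_emod_of_pos (by norm_num)]; omega
  rw [h3]
  by_cases h : cards.toNat % 3 = 1 <;> simp [h, beq_iff_eq] <;> omega
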